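-- pv_equiv track=rewrite | github.com/lvhaojieming/MIndSpeed | mindspeed_llm/fsdp2/data/processor/processor_utils.py | greedy_knapsack
-- ===== SOURCE A (Python) =====
-- import bisect
--
-- def search_for_fit(numbers: list[int], capacity: int) -> int:
--     r"""Find the index of largest number that fits into the knapsack with the given capacity."""
--     index = bisect.bisect(numbers, capacity)
--     return -1 if index == 0 else (index - 1)
--
-- def greedy_knapsack(numbers: list[int], capacity: int) -> list[list[int]]:
--     r"""Implement efficient greedy algorithm with binary search for the knapsack problem."""
--     # sort numbers in ascending order for binary search
--     numbers.sort()
--     knapsacks = []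
--
--     while numbers:
--         current_knapsack = []
--         remaining_capacity = capacity
--
--         while True:
--             index = search_for_fit(numbers, remaining_capacity)
--             if index == -1:
--                 # no more numbers fit in this knapsack
--                 break
--
--             # update the remaining capacity
--             remaining_capacity -= numbers[index]
--             # add the number to knapsack
--             current_knapsack.append(numbers.pop(index))
--
--         knapsacks.append(current_knapsack)
--
--     return knapsacks
-- ===== SOURCE B (Python) =====
-- def greedy_knapsack(numbers: list[int], capacity: int) -> list[list[int]]:
--     """Greedy knapsack packing: no sorting/bisect; each step picks the largest
--     fitting item by a direct scan of the remaining multiset.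
--     (Unlike A, this does not mutate the input list; equivalence is about the return value.)"""
--     items = list(numbers)
--     knapsacks = []
--     while items:
--         sack = []
--         remaining = capacity
--         while True:
--             best = None
--             for x in items:
--                 if x <= remaining and (best is None or best < x):
--                     best = x
--             if best is None:
--                 break
--             items.remove(best)
--             sack.append(best)
--             remaining -= best
--         knapsacks.append(sack)
--     return knapsacks
-- ===== Notes on version B (the rewrite author's own statement) =====
-- stated objective: alternative
-- what changed: A sorts the list and repeatedly binary-searches (bisect) the sorted list, popping by index; B keeps the multiset unsorted and, for each slot, selects the largest fitting item by a single linear scan and removes that value, with no sort and no bisect.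
import Mathlib
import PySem

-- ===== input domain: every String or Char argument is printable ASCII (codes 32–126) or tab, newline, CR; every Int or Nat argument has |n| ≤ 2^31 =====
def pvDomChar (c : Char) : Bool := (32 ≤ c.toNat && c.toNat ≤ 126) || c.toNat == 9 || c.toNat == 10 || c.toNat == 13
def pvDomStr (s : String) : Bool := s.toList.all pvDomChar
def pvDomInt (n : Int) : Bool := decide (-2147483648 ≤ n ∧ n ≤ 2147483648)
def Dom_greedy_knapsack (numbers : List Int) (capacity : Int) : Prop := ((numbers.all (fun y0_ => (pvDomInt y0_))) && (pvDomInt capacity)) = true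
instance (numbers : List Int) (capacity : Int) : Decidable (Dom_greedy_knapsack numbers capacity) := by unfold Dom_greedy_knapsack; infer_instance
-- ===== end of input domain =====

-- ===== PORT A =====
-- B replaces A's sort + bisect + pop-by-index with a direct max-of-fits scan over the unsorted
-- multiset (objective: alternative algorithm, similar cost). Python A mutates `numbers` (sorts and
-- empties it), B does not — the equivalence proved here is about the return value only.
-- A's while-loops are ported with fuel; each inner iteration pops one element, so fuel = list
-- length is never exhausted where Python A returns, and the port is faithful there.

-- search_for_fit: bisect.bisect is PySem.List.bisectRight; A only calls it on its sorted list
def search_for_fit (numbers : List Int) (capacity : Int) : Int :=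
  let index := PySem.List.bisectRight numbers capacity
  if index = 0 then -1 else (index : Int) - 1

-- inner `while True` loop of A: find index of largest fit, pop it, until none fits
def fillLoop : Nat → List Int → Int → List Int → (List Int × List Int)
  | 0, ns, _, acc => (acc.reverse, ns)
  | f + 1, ns, rem, acc =>
    let index := search_for_fit ns rem
    if index = -1 then (acc.reverse, ns)
    else
      match PySem.List.pop? ns index with
      | none => (acc.reverse, ns)
      | some (x, rest) => fillLoop f rest (rem - x) (x :: acc)

-- outer `while numbers` loop of A
def packLoop : Nat → List Int → Int → List (List Int) → List (List Int)
  | 0, _, _, acc => acc.reverse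
  | f + 1, ns, cap, acc =>
    if ns.isEmpty then acc.reverse
    else
      let r := fillLoop ns.length ns cap []
      packLoop f r.2 cap (r.1 :: acc)

def greedy_knapsack (numbers : List Int) (capacity : Int) : List (List Int) :=
  packLoop (numbers.length + 1) (PySem.List.sorted numbers (fun x => x)) capacity []

-- ===== PORT B =====
-- the `for x in items` scan of Source B: running best among the items that fit
def bestLoop : List Int → Int → Option Int → Option Int
  | [], _, best => best
  | x :: rest, rem, best =>
    bestLoop rest rem
      (if x ≤ rem then
        (match best with
         | none => some x
         | some b => if b < x then some x else some b)
       else best)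

-- inner `while True` loop of Source B: pick the largest fitting value, remove its first occurrence
def fillLoopB : Nat → List Int → Int → List Int → (List Int × List Int)
  | 0, its, _, sack => (sack.reverse, its)
  | f + 1, its, rem, sack =>
    match bestLoop its rem none with
    | none => (sack.reverse, its)
    | some b =>
      match PySem.List.remove? its b with
      | none => (sack.reverse, its)
      | some its' => fillLoopB f its' (rem - b) (b :: sack)

-- outer `while items` loop of Source B
def packLoopB : Nat → List Int → Int → List (List Int) → List (List Int)
  | 0, _, _, acc => acc.reverse
  | f + 1, its, cap, acc =>
    if its.isEmpty then acc.reverse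
    else
      let r := fillLoopB its.length its cap []
      packLoopB f r.2 cap (r.1 :: acc)

def greedy_knapsack_alt (numbers : List Int) (capacity : Int) : List (List Int) :=
  packLoopB (numbers.length + 1) numbers capacity []

-- ===== PRECONDITION & SPEC =====
def Spec_greedy_knapsack (numbers : List Int) (capacity : Int) (out : List (List Int)) : Prop := out = greedy_knapsack_alt numbers capacity
instance (numbers : List Int) (capacity : Int) (out : List (List Int)) : Decidable (Spec_greedy_knapsack numbers capacity out) := by unfold Spec_greedy_knapsack; infer_instance

-- ===== CLAIM (what is proved, stated in full; the proofs are below) =====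
def Claim_equal_greedy_knapsack : Prop := ∀ (numbers : List Int) (capacity : Int), Dom_greedy_knapsack numbers capacity → Spec_greedy_knapsack numbers capacity (greedy_knapsack numbers capacity)

-- ===== LEMMAS AND PROOFS =====

lemma bestLoop_none_iff (rem : Int) :
    ∀ (l : List Int) (best : Option Int),
      bestLoop l rem best = none ↔ (best = none ∧ ∀ x ∈ l, rem < x) := by
  intro l
  induction l with
  | nil => intro best; simp [bestLoop]
  | cons x t ih =>
    intro best
    simp only [bestLoop]
    by_cases hx : x ≤ rem
    · cases best with
      | none =>
        simp only [hx, if_pos, ih]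
        constructor
        · rintro ⟨h, -⟩; exact absurd h (by simp)
        · rintro ⟨-, h⟩; exact absurd (h x (by simp)) (by omega)
      | some b =>
        simp only [hx, if_pos, ih]
        constructor
        · rintro ⟨h, -⟩; revert h; split <;> simp
        · rintro ⟨-, h⟩; exact absurd (h x (by simp)) (by omega)
    · simp only [hx, ite_false, ih]
      constructor
      · rintro ⟨h1, h2⟩
        refine ⟨h1, fun y hy => ?_⟩
        rcases List.mem_cons.1 hy with rfl | hy'
        · omega
        · exact h2 y hy' 
      · rintro ⟨h1, h2⟩; exact ⟨h1, fun y hy => h2 y (by simp [hy])⟩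

lemma bestLoop_some_spec (rem : Int) :
    ∀ (l : List Int) (best : Option Int), (∀ c, best = some c → c ≤ rem) →
      ∀ b, bestLoop l rem best = some b →
        (best = some b ∨ b ∈ l) ∧ b ≤ rem ∧ (∀ c, best = some c → c ≤ b) ∧
          (∀ x ∈ l, x ≤ rem → x ≤ b) := by
  intro l
  induction l with
  | nil =>
    intro best hb b h
    simp [bestLoop] at h
    exact ⟨Or.inl h, hb b h, fun c hc => by rw [h] at hc; simp at hc; omega, by simp⟩
  | cons x t ih =>
    intro best hb b h
    simp only [bestLoop] at h
    by_cases hx : x ≤ rem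
    · rw [if_pos hx] at h
      cases best with
      | none =>
        obtain ⟨hmem, hle, hacc, hall⟩ := ih (some x) (by rintro c ⟨rfl⟩; exact hx) b h
        refine ⟨Or.inr ?_, hle, by simp, ?_⟩
        · rcases hmem with hm | hm
          · simp at hm; simp [hm]
          · simp [hm]
        · intro y hy hyr
          rcases List.mem_cons.1 hy with rfl | hy
          · exact hacc y rfl
          · exact hall y hy hyr
      | some c =>
        have hc : c ≤ rem := hb c rfl
        have h' : bestLoop t rem (if c < x then some x else some c) = some b := h
        by_cases hcx : c < x
        · rw [if_pos hcx] at h'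
          obtain ⟨hmem, hle, hacc, hall⟩ := ih (some x) (by rintro d ⟨rfl⟩; exact hx) b h'
          have hxb : x ≤ b := hacc x rfl
          refine ⟨Or.inr ?_, hle, by rintro d ⟨rfl⟩; omega, ?_⟩
          · rcases hmem with hm | hm
            · simp at hm; simp [hm]
            · simp [hm]
          · intro y hy hyr
            rcases List.mem_cons.1 hy with rfl | hy
            · omega
            · exact hall y hy hyr
        · rw [if_neg hcx] at h'
          obtain ⟨hmem, hle, hacc, hall⟩ := ih (some c) hb b h'
          have hcb : c ≤ b := hacc c rfl
          refine ⟨?_, hle, by rintro d ⟨rfl⟩; omega, ?_⟩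
          · rcases hmem with hm | hm
            · exact Or.inl hm
            · exact Or.inr (by simp [hm])
          · intro y hy hyr
            rcases List.mem_cons.1 hy with rfl | hy
            · omega
            · exact hall y hy hyr
    · rw [if_neg hx] at h
      obtain ⟨hmem, hle, hacc, hall⟩ := ih best hb b h
      refine ⟨?_, hle, hacc, ?_⟩
      · rcases hmem with hm | hm
        · exact Or.inl hm
        · exact Or.inr (by simp [hm])
      · intro y hy hyr
        rcases List.mem_cons.1 hy with rfl | hy
        · omega
        · exact hall y hy hyr

lemma sorted_break_of_bisect_zero (ns : List Int) (rem : Int)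
    (hs : List.Pairwise (fun a b => a ≤ b) ns)
    (h0 : PySem.List.bisectRight ns rem = 0) :
    ∀ x ∈ ns, rem < x := by
  intro x hx
  obtain ⟨j, hj, rfl⟩ := List.mem_iff_getElem.1 hx
  exact (PySem.List.bisectRight_spec ns rem hs).2.2 j hj (by omega)

lemma sorted_max_of_bisect_pos (ns : List Int) (rem : Int)
    (hs : List.Pairwise (fun a b => a ≤ b) ns)
    (hpos : 0 < PySem.List.bisectRight ns rem) :
    ∃ h : PySem.List.bisectRight ns rem - 1 < ns.length,
      ns[PySem.List.bisectRight ns rem - 1] ≤ rem ∧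
        ∀ x ∈ ns, x ≤ rem → x ≤ ns[PySem.List.bisectRight ns rem - 1] := by
  obtain ⟨hle, hlt, hgt⟩ := PySem.List.bisectRight_spec ns rem hs
  have hlen : PySem.List.bisectRight ns rem - 1 < ns.length := by omega
  refine ⟨hlen, hlt _ hlen (by omega), ?_⟩
  intro x hx hxr
  obtain ⟨j, hj, rfl⟩ := List.mem_iff_getElem.1 hx
  by_cases hji : j < PySem.List.bisectRight ns rem
  · rcases Nat.lt_or_ge j (PySem.List.bisectRight ns rem - 1) with h | h
    · exact (List.pairwise_iff_getElem.1 hs) j _ hj hlen h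
    · have : j = PySem.List.bisectRight ns rem - 1 := by omega
      subst this; exact le_refl _
  · exact absurd hxr (by have := hgt j hj (by omega); omega)

lemma perm_cons_eraseIdx_of_getElem (l : List Int) (i : Nat) (h : i < l.length) :
    l.Perm (l[i] :: l.eraseIdx i) := by
  induction l generalizing i with
  | nil => simp at h
  | cons c t ih =>
    cases i with
    | zero => simp
    | succ j =>
      simp only [List.getElem_cons_succ, List.eraseIdx_cons_succ]
      exact ((ih j (by simpa using h)).cons c).trans (List.Perm.swap _ _ _)

lemma fill_eq :
    ∀ (f : Nat) (ns its : List Int) (r : Int) (acc : List Int),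
      List.Pairwise (fun a b => a ≤ b) ns → ns.Perm its →
      (fillLoop f ns r acc).1 = (fillLoopB f its r acc).1 ∧
        List.Pairwise (fun a b => a ≤ b) (fillLoop f ns r acc).2 ∧
        (fillLoop f ns r acc).2.Perm (fillLoopB f its r acc).2 := by
  intro f
  induction f with
  | zero => intro ns its r acc hs hp; exact ⟨rfl, hs, hp⟩
  | succ f ih =>
    intro ns its r acc hs hp
    by_cases h0 : PySem.List.bisectRight ns r = 0
    · -- A breaks; all elements > r, B breaks too
      have hall : ∀ x ∈ ns, r < x := sorted_break_of_bisect_zero ns r hs h0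
      have hB : bestLoop its r none = none :=
        (bestLoop_none_iff r its none).2 ⟨rfl, fun x hx => hall x (hp.mem_iff.2 hx)⟩
      simp only [fillLoop, fillLoopB, search_for_fit, h0, if_pos, hB]
      exact ⟨trivial, hs, hp⟩
    · have hpos : 0 < PySem.List.bisectRight ns r := Nat.pos_of_ne_zero h0
      obtain ⟨hlen, hfit, hmax⟩ := sorted_max_of_bisect_pos ns r hs hpos
      set i := PySem.List.bisectRight ns r with hi
      set b := ns[i - 1] with hbdef
      -- A's step
      have hidx : search_for_fit ns r = ((i - 1 : Nat) : Int) := by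
        simp only [search_for_fit, hi]
        omega
      have hpop : PySem.List.pop? ns ((i - 1 : Nat) : Int) = some (b, ns.eraseIdx (i - 1)) :=
        PySem.List.pop?_natCast ns (i - 1) hlen
      -- B's step
      have hbmem : b ∈ its := hp.mem_iff.1 (List.getElem_mem hlen)
      have hBsome : ∃ b', bestLoop its r none = some b' := by
        cases hE : bestLoop its r none with
        | none =>
          have := ((bestLoop_none_iff r its none).1 hE).2 b hbmem
          omega
        | some b' => exact ⟨b', rfl⟩
      obtain ⟨b', hB⟩ := hBsome
      obtain ⟨hmem', hle', -, hall'⟩ := bestLoop_some_spec r its none (by simp) b' hB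
      have hmemb' : b' ∈ its := by
        rcases hmem' with h | h
        · simp at h
        · exact h
      have hbb : b' = b := by
        have h1 : b' ≤ b := hmax b' (hp.mem_iff.2 hmemb') hle'
        have h2 : b ≤ b' := hall' b hbmem hfit
        omega
      subst hbb
      have hrem : PySem.List.remove? its b = some (its.erase b) :=
        PySem.List.remove?_eq_some_erase its b hbmem
      have hne : search_for_fit ns r ≠ -1 := by rw [hidx]; omega
      simp only [fillLoop, fillLoopB, hidx, hB, hrem]
      rw [if_neg (by omega : ¬ ((i - 1 : Nat) : Int) = -1)]
      simp only [hpop]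
      -- invariants for the recursive call
      have hs' : List.Pairwise (fun a b => a ≤ b) (ns.eraseIdx (i - 1)) :=
        hs.sublist (List.eraseIdx_sublist ns (i - 1))
      have hp' : (ns.eraseIdx (i - 1)).Perm (its.erase b) := by
        have h1 : ns.Perm (b :: ns.eraseIdx (i - 1)) := perm_cons_eraseIdx_of_getElem ns (i - 1) hlen
        have h2 : its.Perm (b :: its.erase b) := List.perm_cons_erase hbmem
        exact (List.Perm.cons_inv (h1.symm.trans (hp.trans h2)))
      exact ih _ _ _ _ hs' hp'

lemma pack_eq :
    ∀ (f : Nat) (ns its : List Int) (cap : Int) (acc : List (List Int)),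
      List.Pairwise (fun a b => a ≤ b) ns → ns.Perm its →
      packLoop f ns cap acc = packLoopB f its cap acc := by
  intro f
  induction f with
  | zero => intro ns its cap acc hs hp; rfl
  | succ f ih =>
    intro ns its cap acc hs hp
    simp only [packLoop, packLoopB]
    by_cases hnil : ns = []
    · have hits : its = [] := by
        subst hnil
        exact hp.symm.eq_nil
      rw [hnil, hits]
      simp
    · have hits : its ≠ [] := fun h => hnil (by rw [h] at hp; exact hp.eq_nil)
      rw [if_neg (by simpa using hnil), if_neg (by simpa using hits)]
      have hlen : its.length = ns.length := hp.length_eq.symm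
      obtain ⟨h1, h2, h3⟩ := fill_eq ns.length ns its cap [] hs hp
      rw [hlen, ← h1]
      exact ih _ _ _ _ h2 h3

-- ===== VERDICT (by name: the statement is the Claim_ definition above) =====
theorem greedy_knapsack_spec : Claim_equal_greedy_knapsack := by
  intro numbers capacity _
  unfold Spec_greedy_knapsack greedy_knapsack greedy_knapsack_alt
  exact pack_eq (numbers.length + 1) _ numbers capacity []
    (PySem.List.sorted_pairwise numbers (fun x => x))
    (PySem.List.sorted_perm numbers (fun x => x) false)
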